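-- pv_equiv track=rewrite | github.com/RISHIT7/Programming | COL/COL100/Lab_7/q5.py | neg_before_pos
-- ===== SOURCE A (Python) =====
-- def neg_before_pos(L):
--     i = 0
--     j = 0
--     while i < len(L):
--         if L[i] < 0:
--             k = L.pop(i)
--             L.insert(j, k)
--             j += 1
--         i += 1
--     return L
-- ===== SOURCE B (Python) =====
-- def neg_before_pos(L):
--     neg = [x for x in L if x < 0]
--     nonneg = [x for x in L if x >= 0]
--     L[:] = neg + nonneg
--     return L
-- ===== Notes on version B (the rewrite author's own statement) =====
-- stated objective: faster
-- what changed: Replaced the quadratic in-place pop/insert loop by a single pass that collects negatives and non-negatives into two lists and concatenates them (stable partition).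
import Mathlib
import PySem

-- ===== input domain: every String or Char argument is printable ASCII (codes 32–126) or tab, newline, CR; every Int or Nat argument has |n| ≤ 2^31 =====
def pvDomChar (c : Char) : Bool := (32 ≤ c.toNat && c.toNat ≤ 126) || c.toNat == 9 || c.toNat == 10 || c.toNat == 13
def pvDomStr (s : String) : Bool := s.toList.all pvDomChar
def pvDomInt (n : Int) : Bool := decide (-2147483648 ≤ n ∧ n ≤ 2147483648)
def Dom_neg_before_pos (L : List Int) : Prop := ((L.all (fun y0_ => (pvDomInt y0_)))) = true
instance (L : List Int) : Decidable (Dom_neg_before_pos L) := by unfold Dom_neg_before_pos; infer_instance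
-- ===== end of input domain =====

-- B replaces A's quadratic in-place pop/insert loop by one pass building the negatives
-- and the non-negatives and concatenating (stable partition); both A and B mutate the
-- Python argument in place, and the equivalence proved here is about the return value.

-- ===== PORT A =====
-- while loop of A: state (L, i, j); terminates because i grows while len(L) is unchanged
def negBeforePosLoopA (L : List Int) (i j : Nat) : List Int :=
  if h : i < L.length then
    if L[i] < 0 then
      match hp : PySem.List.pop? L (i : Int) with
      | some (k, rest) =>
          negBeforePosLoopA (PySem.List.insert rest (j : Int) k) (i + 1) (j + 1)
      | none => L   -- unreachable: i < len L
    else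
      negBeforePosLoopA L (i + 1) j
  else
    L
termination_by L.length - i
decreasing_by
  · have hlen := PySem.List.length_of_pop?_eq_some L hp
    simp only [PySem.List.length_insert] at *
    omega
  · omega

def neg_before_pos (L : List Int) : List Int := negBeforePosLoopA L 0 0

-- ===== PORT B =====
def neg_before_pos_alt (L : List Int) : List Int :=
  (L.filter (fun x => decide (x < 0))) ++ (L.filter (fun x => decide (0 ≤ x)))

-- ===== PRECONDITION & SPEC =====
def Spec_neg_before_pos (L : List Int) (out : List Int) : Prop := out = neg_before_pos_alt L
instance (L : List Int) (out : List Int) : Decidable (Spec_neg_before_pos L out) := by unfold Spec_neg_before_pos; infer_instance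

-- ===== CLAIM (what is proved, stated in full; the proofs are below) =====
def Claim_equal_neg_before_pos : Prop := ∀ (L : List Int), Dom_neg_before_pos L → Spec_neg_before_pos L (neg_before_pos L)

-- ===== LEMMAS AND PROOFS =====

-- Invariant: processed prefix = negatives N ++ non-negatives M, suffix S still to scan.
theorem negBeforePosLoopA_invariant (S : List Int) :
    ∀ (N M : List Int), (∀ x ∈ N, x < 0) → (∀ x ∈ M, 0 ≤ x) →
    negBeforePosLoopA (N ++ M ++ S) (N.length + M.length) N.length =
      (N ++ S.filter (fun x => decide (x < 0))) ++ (M ++ S.filter (fun x => decide (0 ≤ x))) := by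
  induction S with
  | nil =>
      intro N M _ _
      rw [negBeforePosLoopA]
      simp
  | cons h T ih =>
      intro N M hN hM
      have hi : N.length + M.length < (N ++ M ++ (h :: T)).length := by simp
      have hget : (N ++ M ++ (h :: T))[N.length + M.length]'hi = h := by
        simp [List.getElem_append_right]
      rw [negBeforePosLoopA, dif_pos hi, hget]
      by_cases hneg : h < 0
      · rw [if_pos hneg]
        have hpop : PySem.List.pop? (N ++ M ++ (h :: T)) ((N.length + M.length : Nat) : Int)
            = some (h, N ++ M ++ T) := by
          rw [PySem.List.pop?_natCast _ _ hi, hget]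
          congr 1
          have : N ++ M ++ (h :: T) = (N ++ M) ++ (h :: T) := by simp
          rw [this]
          rw [List.eraseIdx_append_of_length_le (by simp)]
          simp
        rw [hpop]
        show negBeforePosLoopA (PySem.List.insert (N ++ M ++ T) ((N.length : Nat) : Int) h)
            (N.length + M.length + 1) (N.length + 1) = _
        have hins : PySem.List.insert (N ++ M ++ T) ((N.length : Nat) : Int) h
            = (N ++ [h]) ++ M ++ T := by
          rw [PySem.List.insert_natCast _ _ _ (by simp)]
          rw [show N ++ M ++ T = N ++ (M ++ T) by simp]
          rw [List.take_left' rfl, List.drop_left' rfl]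
          simp
        rw [hins]
        have := ih (N ++ [h]) M
          (by intro x hx; rcases List.mem_append.mp hx with hx | hx
              · exact hN x hx
              · simp at hx; omega)
          hM
        simp only [List.length_append, List.length_cons, List.length_nil] at this ⊢
        have harg : N.length + 1 + M.length = N.length + M.length + 1 := by omega
        rw [show N.length + M.length + 1 = (N.length + 1) + M.length by omega]
        rw [this]
        simp [hneg, List.append_assoc]
      · rw [if_neg hneg]
        have h0 : 0 ≤ h := by omega
        have := ih N (M ++ [h]) hN
          (by intro x hx; rcases List.mem_append.mp hx with hx | hx
              · exact hM x hx
              · simp at hx; omega)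
        simp only [List.length_append, List.length_cons, List.length_nil] at this
        rw [show (N ++ M ++ (h :: T)) = (N ++ (M ++ [h]) ++ T) by simp,
            show N.length + M.length + 1 = N.length + (M.length + 1) by omega, this]
        simp [hneg, h0, List.append_assoc]

-- ===== VERDICT (by name: the statement is the Claim_ definition above) =====
theorem neg_before_pos_spec : Claim_equal_neg_before_pos := by
  intro L _
  unfold Spec_neg_before_pos neg_before_pos neg_before_pos_alt
  have := negBeforePosLoopA_invariant L [] [] (by simp) (by simp)
  simpa using this
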